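-- pv_equiv track=rewrite | github.com/SushmithaNataraj/NLP | Programming Assignment 3/data/lesk.py | lesk
-- ===== SOURCE A (Python) =====
-- def constructContextSet(sentence):
--     contextWordsLst = sentence.split()
--     contextSet = set()
--     for word in contextWordsLst:
--         contextSet.add(word.lower())
--     return contextSet
--
-- def lesk(senseDict, sentence):
--     leskDict = {}
--     context = constructContextSet(sentence)
--
--     for sense in senseDict:
--         signature = senseDict[sense]
--         overlap_words = signature & context
--         # remove words that don't contain alphabets
--         removeSet = set()
--         for word in overlap_words:
--             if not any(c.isalpha() for c in word):
--                 removeSet.add(word)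
--         for word in removeSet:
--             overlap_words.remove(word)
--         overlap = len(overlap_words)
--
--         leskDict[sense] = overlap
--     ordered_items = sorted(leskDict.items(), key = lambda x:(-x[1], x[0]))
--     return ordered_items
-- ===== SOURCE B (Python) =====
-- def lesk(senseDict, sentence):
--     # Inverted index: map each signature word to the senses containing it, then
--     # score all senses in ONE pass over the sentence's distinct alphabetic tokens.
--     scores = {sense: 0 for sense in senseDict}
--     index = {}
--     for sense, signature in senseDict.items():
--         for w in signature:
--             index.setdefault(w, []).append(sense)
--     seen = set()
--     for tok in sentence.split():
--         w = tok.lower()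
--         if w in seen or not any(c.isalpha() for c in w):
--             continue
--         seen.add(w)
--         for sense in index.get(w, []):
--             scores[sense] = scores.get(sense, 0) + 1
--     return sorted(scores.items(), key=lambda x: (-x[1], x[0]))
-- ===== Notes on version B (the rewrite author's own statement) =====
-- stated objective: alternative
-- what changed: Instead of intersecting each sense's signature set with the context, B builds an inverted index word->senses once and scores all senses incrementally in a single pass over the sentence's distinct alphabetic lowered tokens, then sorts the scores dict.
import Mathlib
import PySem

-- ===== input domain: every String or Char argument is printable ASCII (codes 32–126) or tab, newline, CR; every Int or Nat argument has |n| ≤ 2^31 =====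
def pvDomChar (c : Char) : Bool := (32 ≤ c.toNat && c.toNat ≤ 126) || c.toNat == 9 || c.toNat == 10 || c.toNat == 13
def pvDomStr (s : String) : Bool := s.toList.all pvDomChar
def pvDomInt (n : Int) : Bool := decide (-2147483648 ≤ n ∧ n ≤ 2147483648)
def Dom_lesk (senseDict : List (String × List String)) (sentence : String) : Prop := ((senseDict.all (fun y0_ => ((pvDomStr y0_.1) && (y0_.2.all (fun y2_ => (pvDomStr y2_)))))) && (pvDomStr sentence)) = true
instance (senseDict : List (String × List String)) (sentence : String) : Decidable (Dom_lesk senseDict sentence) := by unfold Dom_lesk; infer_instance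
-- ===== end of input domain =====

-- B replaces A's per-sense set-intersection loop by an inverted index (word → senses)
-- and one incremental-scoring pass over the sentence's distinct alphabetic tokens;
-- objective: alternative (different algorithm/data structure, same asymptotic cost).

-- any(c.isalpha() for c in word) — used verbatim by both sources
def pvHasAlpha (w : String) : Bool := w.toList.any (fun c => PySem.Chars.isalpha c)

-- ===== PORT A =====
def constructContextSet (sentence : String) : PySem.Set String :=
  (PySem.Str.split₀ sentence).foldl
    (fun contextSet word => PySem.Set.add contextSet (PySem.Str.lower word)) PySem.Set.empty

def lesk (senseDict : List (String × List String)) (sentence : String) : List (String × Int) :=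
  let d := PySem.Dict.mk senseDict
  let context := constructContextSet sentence
  let leskDict := d.keys.foldl (fun leskDict sense =>
      let signature := d.getD sense []          -- senseDict[sense]: sense is a key, cannot raise
      let overlap_words := PySem.Set.inter signature context
      let removeSet := overlap_words.foldl
        (fun removeSet word =>
          if !(pvHasAlpha word) then PySem.Set.add removeSet word else removeSet)
        PySem.Set.empty
      let overlap_words := removeSet.foldl
        (fun overlap_words word => PySem.Set.discard overlap_words word) overlap_words
        -- .remove: word ∈ overlap_words, so remove = discard, never KeyError
      leskDict.insert sense (PySem.Set.len overlap_words))
    PySem.Dict.empty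
  PySem.List.sorted2 leskDict.items (fun x => -x.2) (fun x => x.1)

-- ===== PORT B =====
-- the body of B's scoring loop over sentence tokens (seen-set, scores dict)
def pvStepB (index : PySem.Dict String (List String))
    (st : PySem.Set String × PySem.Dict String Int) (tok : String) :
    PySem.Set String × PySem.Dict String Int :=
  let w := PySem.Str.lower tok
  if PySem.Set.contains st.1 w || !(pvHasAlpha w) then st
  else (PySem.Set.add st.1 w,
        (index.getD w []).foldl (fun sc sense => sc.modify sense 0 (· + 1)) st.2)

def lesk_alt (senseDict : List (String × List String)) (sentence : String) : List (String × Int) :=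
  let scores0 : PySem.Dict String Int :=
    senseDict.foldl (fun d p => d.insert p.1 0) PySem.Dict.empty
  let index : PySem.Dict String (List String) :=
    senseDict.foldl (fun idx p =>
      p.2.foldl (fun idx w => idx.modify w [] (· ++ [p.1])) idx) PySem.Dict.empty
  let final := (PySem.Str.split₀ sentence).foldl (pvStepB index)
    ((PySem.Set.empty : PySem.Set String), scores0)
  PySem.List.sorted2 final.2.items (fun x => -x.2) (fun x => x.1)

-- ===== PRECONDITION & SPEC =====
-- senseDict encodes a Python dict[str, set[str]]: Pre_ requires the association-list
-- keys to be distinct and each signature list duplicate-free, since a Python dict/set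
-- argument cannot carry duplicates at all (no input A returns on is excluded).
def Pre_lesk (senseDict : List (String × List String)) (sentence : String) : Prop :=
  (senseDict.map Prod.fst).Nodup ∧ ∀ p ∈ senseDict, p.2.Nodup
instance (senseDict : List (String × List String)) (sentence : String) : Decidable (Pre_lesk senseDict sentence) := by unfold Pre_lesk; infer_instance

def pvWitness_lesk : (List (String × List String)) × String :=
  ([("bank", ["money", "river"]), ("spring", ["water", "season"])], "the money in the river bank")

def Spec_lesk (senseDict : List (String × List String)) (sentence : String) (out : List (String × Int)) : Prop := out = lesk_alt senseDict sentence
instance (senseDict : List (String × List String)) (sentence : String) (out : List (String × Int)) : Decidable (Spec_lesk senseDict sentence out) := by unfold Spec_lesk; infer_instance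

-- ===== CLAIM (what is proved, stated in full; the proofs are below) =====
def Claim_equal_lesk : Prop := ∀ (senseDict : List (String × List String)) (sentence : String), Dom_lesk senseDict sentence → Pre_lesk senseDict sentence → Spec_lesk senseDict sentence (lesk senseDict sentence)

-- ===== LEMMAS AND PROOFS =====

-- the context list both sides effectively score against:
-- distinct lowered tokens containing a letter, in first-occurrence order
def pvCtx (toks : List String) : List String :=
  PySem.Set.ofList ((toks.map PySem.Str.lower).filter pvHasAlpha)

-- the distinct new words the B loop actually processes, in order
def pvNewList (s : PySem.Set String) : List String → List String
  | [] => []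
  | t :: ts =>
    let w := PySem.Str.lower t
    if PySem.Set.contains s w || !(pvHasAlpha w) then pvNewList s ts
    else w :: pvNewList (PySem.Set.add s w) ts

theorem pv_char_le_iff (a b : Char) : a ≤ b ↔ a.toNat ≤ b.toNat := by
  rw [Char.le_def, UInt32.le_iff_toNat_le]
  exact Iff.rfl

theorem pv_isupper_iff (c : Char) : PySem.Chars.isupper c = true ↔ 65 ≤ c.toNat ∧ c.toNat ≤ 90 := by
  have hA : ('A' : Char).toNat = 65 := rfl
  have hZ : ('Z' : Char).toNat = 90 := rfl
  simp only [PySem.Chars.isupper, Bool.and_eq_true, decide_eq_true_eq, pv_char_le_iff, hA, hZ]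

theorem pv_isalpha_lowerChar (c : Char) :
    PySem.Chars.isalpha (PySem.Chars.lowerChar c) = PySem.Chars.isalpha c := by
  rw [PySem.Chars.lowerChar]
  cases h : PySem.Chars.isupper c with
  | false => simp
  | true =>
    rw [if_pos rfl]
    obtain ⟨h1, h2⟩ := (pv_isupper_iff c).mp h
    have hv : (c.toNat + 32).isValidChar := Or.inl (by omega)
    have ht : (Char.ofNat (c.toNat + 32)).toNat = c.toNat + 32 := by
      rw [Char.toNat_ofNat, if_pos hv]
    have hlow : PySem.Chars.islower (Char.ofNat (c.toNat + 32)) = true := by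
      have ha : ('a' : Char).toNat = 97 := rfl
      have hz : ('z' : Char).toNat = 122 := rfl
      simp only [PySem.Chars.islower, Bool.and_eq_true, decide_eq_true_eq, pv_char_le_iff,
        ht, ha, hz]
      omega
    simp [PySem.Chars.isalpha, h, hlow]

theorem pv_alpha_lower (w : String) : pvHasAlpha (PySem.Str.lower w) = pvHasAlpha w := by
  simp only [pvHasAlpha, PySem.Str.lower, PySem.Chars.lower, String.toList_ofList, List.any_map]
  simp [Function.comp_def, pv_isalpha_lowerChar]

theorem pv_contains_eq (s : List String) (y : String) : s.contains y = decide (y ∈ s) := by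
  by_cases h : y ∈ s <;> simp [h]

-- membership of the removeSet fold (A's per-sense removal pass)
theorem pv_mem_removeFold (l : List String) (init : PySem.Set String) (x : String) :
    x ∈ l.foldl (fun r w => if !(pvHasAlpha w) then PySem.Set.add r w else r) init ↔
      x ∈ init ∨ (x ∈ l ∧ pvHasAlpha x = false) := by
  induction l generalizing init with
  | nil => simp
  | cons w l ih =>
    rw [List.foldl_cons, ih]
    cases hw : pvHasAlpha w with
    | true =>
      simp only [Bool.not_true, Bool.false_eq_true, if_false, List.mem_cons]
      constructor
      · rintro (h | h)
        · exact Or.inl h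
        · exact Or.inr ⟨Or.inr h.1, h.2⟩
      · rintro (h | ⟨(rfl | hm), hq⟩)
        · exact Or.inl h
        · rw [hw] at hq; cases hq
        · exact Or.inr ⟨hm, hq⟩
    | false =>
      simp only [Bool.not_false, if_true, PySem.Set.mem_add, List.mem_cons]
      constructor
      · rintro ((h | rfl) | h)
        · exact Or.inl h
        · exact Or.inr ⟨Or.inl rfl, hw⟩
        · exact Or.inr ⟨Or.inr h.1, h.2⟩
      · rintro (h | ⟨(rfl | hm), hq⟩)
        · exact Or.inl (Or.inl h)
        · exact Or.inl (Or.inr rfl)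
        · exact Or.inr ⟨hm, hq⟩

-- removing every element of rs from ow, one discard at a time, filters ow by rs
theorem pv_foldl_discard (rs ow : List String) :
    rs.foldl (fun s w => PySem.Set.discard s w) ow = ow.filter (fun y => decide (y ∉ rs)) := by
  induction rs generalizing ow with
  | nil => simp
  | cons r rs ih =>
    simp only [List.foldl_cons]
    rw [show (PySem.Set.discard ow r) = ow.filter (fun y => !(y == r)) from rfl, ih,
      List.filter_filter]
    apply List.filter_congr
    intro y _
    by_cases h1 : y = r <;> by_cases h2 : y ∈ rs <;> simp [h1, h2]

theorem pv_mem_fctx (tokens : List String) (y : String) :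
    y ∈ PySem.Set.ofList ((tokens.filter pvHasAlpha).map PySem.Str.lower) ↔
      y ∈ PySem.Set.ofList (tokens.map PySem.Str.lower) ∧ pvHasAlpha y = true := by
  simp only [PySem.Set.mem_ofList, List.mem_map, List.mem_filter]
  constructor
  · rintro ⟨t, ⟨ht, ha⟩, rfl⟩
    exact ⟨⟨t, ht, rfl⟩, by rw [pv_alpha_lower]; exact ha⟩
  · rintro ⟨⟨t, ht, rfl⟩, ha⟩
    exact ⟨t, ⟨ht, by rw [← pv_alpha_lower]; exact ha⟩, rfl⟩

theorem pv_decide_and (p q : Prop) [Decidable p] [Decidable q] :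
    (decide p && decide q) = decide (p ∧ q) := by
  by_cases hp : p <;> by_cases hq : q <;> simp [hp, hq]

theorem pv_decide_eq (p q : Prop) [Decidable p] [Decidable q] (h : p ↔ q) :
    decide p = decide q := by
  by_cases hp : p
  · have hq : q := h.mp hp
    simp [hp, hq]
  · have hq : ¬ q := fun hq => hp (h.mpr hq)
    simp [hp, hq]

-- A's per-sense score: inter + remove pass = inter against the alpha-filtered context
theorem pv_ov_eq (sig tokens : List String) :
    PySem.Set.len
      (((PySem.Set.inter sig (PySem.Set.ofList (tokens.map PySem.Str.lower))).foldl
          (fun removeSet word =>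
            if !(pvHasAlpha word) then PySem.Set.add removeSet word else removeSet)
          PySem.Set.empty).foldl
        (fun overlap_words word => PySem.Set.discard overlap_words word)
        (PySem.Set.inter sig (PySem.Set.ofList (tokens.map PySem.Str.lower)))) =
    PySem.Set.len (PySem.Set.inter sig
      (PySem.Set.ofList ((tokens.filter pvHasAlpha).map PySem.Str.lower))) := by
  rw [pv_foldl_discard]
  unfold PySem.Set.len
  congr 1
  simp only [PySem.Set.inter, List.filter_filter]
  refine congrArg List.length (List.filter_congr ?_)
  intro y hy
  have hRS := pv_mem_removeFold
      (List.filter (fun x => PySem.Set.contains (PySem.Set.ofList (List.map PySem.Str.lower tokens)) x) sig)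
      PySem.Set.empty y
  simp only [PySem.Set.contains, pv_contains_eq] at hRS ⊢
  rw [pv_decide_and]
  refine pv_decide_eq _ _ ?_
  rw [hRS]
  rw [pv_mem_fctx]
  have hf : y ∈ List.filter (fun x => decide (x ∈ PySem.Set.ofList (List.map PySem.Str.lower tokens))) sig
      ↔ y ∈ PySem.Set.ofList (List.map PySem.Str.lower tokens) := by
    simp [List.mem_filter, hy]
  rw [hf]
  have he : (y ∈ (PySem.Set.empty : PySem.Set String)) ↔ False := by
    simp [PySem.Set.empty]
  rw [he]
  by_cases hc : y ∈ PySem.Set.ofList (List.map PySem.Str.lower tokens) <;>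
    cases ha : pvHasAlpha y <;> simp [hc, ha]

theorem pv_context_eq (s : String) :
    constructContextSet s = PySem.Set.ofList ((PySem.Str.split₀ s).map PySem.Str.lower) := by
  rw [constructContextSet, PySem.Set.ofList, List.foldl_map]

-- A's result, characterised: per-sense intersection lengths against the filtered context
theorem pv_lesk_A (senseDict : List (String × List String)) (sentence : String)
    (hpre : Pre_lesk senseDict sentence) :
    lesk senseDict sentence =
      PySem.List.sorted2
        (senseDict.map (fun p => (p.1,
          PySem.Set.len (PySem.Set.inter p.2
            (PySem.Set.ofList (((PySem.Str.split₀ sentence).filter pvHasAlpha).map PySem.Str.lower))))))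
        (fun x => -x.2) (fun x => x.1) := by
  obtain ⟨hkeys, _hsigs⟩ := hpre
  have hkeys' : ((PySem.Dict.mk senseDict).keys.map (fun a : String => a)).Nodup := by
    simpa [PySem.Dict.keys_mk] using hkeys
  simp only [lesk]
  rw [PySem.Dict.items_foldl_insert_fresh ((PySem.Dict.mk senseDict).keys)
      (fun a : String => a) _ PySem.Dict.empty
      (fun a _ => PySem.Dict.contains_empty a) hkeys']
  rw [show (PySem.Dict.empty : PySem.Dict String Int).items = [] from rfl, List.nil_append]
  rw [PySem.Dict.keys_mk, List.map_map]
  congr 1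
  apply List.map_congr_left
  intro p hp
  have hget : (PySem.Dict.mk senseDict).getD p.1 [] = p.2 :=
    PySem.Dict.getD_of_mem_items (PySem.Dict.mk senseDict) (by simpa using hp)
      (by simpa [PySem.Dict.keys_mk] using hkeys) []
  simp only [Function.comp_def, hget, pv_context_eq]
  exact congrArg (Prod.mk p.1) (pv_ov_eq p.2 (PySem.Str.split₀ sentence))

-- the two ways of writing the filtered context are the same list
theorem pv_fctx_eq (toks : List String) :
    ((toks.filter pvHasAlpha).map PySem.Str.lower) = ((toks.map PySem.Str.lower).filter pvHasAlpha) := by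
  rw [List.filter_map]
  refine congrArg (List.map PySem.Str.lower) (List.filter_congr ?_)
  intro t _
  simp [Function.comp_def, pv_alpha_lower]

-- keys in a list with distinct fst determine the pair
theorem pv_key_unique (sd : List (String × List String))
    (h : (sd.map Prod.fst).Nodup) (p q : String × List String)
    (hp : p ∈ sd) (hq : q ∈ sd) (he : q.1 = p.1) : q = p := by
  induction sd with
  | nil => cases hp
  | cons r l ih =>
    simp only [List.map_cons, List.nodup_cons] at h
    rcases List.mem_cons.mp hp with rfl | hp' <;> rcases List.mem_cons.mp hq with rfl | hq'
    · rfl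
    · have hmem : q.1 ∈ l.map Prod.fst := List.mem_map_of_mem hq'
      rw [he] at hmem
      exact absurd hmem h.1
    · have hmem : p.1 ∈ l.map Prod.fst := List.mem_map_of_mem hp'
      rw [← he] at hmem
      exact absurd hmem h.1
    · exact ih h.2 hp' hq'

-- B's inverted index: what index.get(w, []) holds
theorem pv_idx_getD (sd : List (String × List String)) (d : PySem.Dict String (List String))
    (hsig : ∀ p ∈ sd, p.2.Nodup) (w : String) :
    ((sd.foldl (fun idx p =>
        p.2.foldl (fun idx w => idx.modify w [] (· ++ [p.1])) idx) d).getD w []) =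
      d.getD w [] ++ (sd.filter (fun p => decide (w ∈ p.2))).map Prod.fst := by
  induction sd generalizing d with
  | nil => simp
  | cons p l ih =>
    rw [List.foldl_cons, ih _ (fun q hq => hsig q (List.mem_cons_of_mem p hq))]
    have hinner : (p.2.foldl (fun idx w => idx.modify w [] (· ++ [p.1])) d).getD w [] =
        d.getD w [] ++ (if w ∈ p.2 then [p.1] else []) := by
      have h1 : p.2.foldl (fun idx w => idx.modify w [] (· ++ [p.1])) d =
          (p.2.map (fun w => (w, p.1))).foldl (fun d q => d.modify q.1 [] (· ++ [q.2])) d := by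
        rw [List.foldl_map]
      rw [h1, PySem.Dict.getD_foldl_modify_append]
      congr 1
      have h2 : ((p.2.map (fun w => (w, p.1))).filter (fun q => q.1 == w)) =
          (p.2.filter (fun v => v == w)).map (fun v => (v, p.1)) := by
        rw [List.filter_map]; rfl
      rw [h2, List.map_map]
      have h3 : p.2.filter (fun v => v == w) = if w ∈ p.2 then [w] else [] := by
        rw [List.filter_beq]
        by_cases hm : w ∈ p.2
        · rw [List.count_eq_one_of_mem (hsig p (List.mem_cons_self)) hm]
          simp [hm]
        · rw [List.count_eq_zero_of_not_mem hm]
          simp [hm]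
      rw [h3]
      by_cases hm : w ∈ p.2 <;> simp [hm]
    rw [hinner]
    by_cases hm : w ∈ p.2 <;> simp [hm, List.append_assoc]

-- B's initial scores dict
theorem pv_scores0_items (sd : List (String × List String))
    (hk : (sd.map Prod.fst).Nodup) :
    (sd.foldl (fun d p => d.insert p.1 0) (PySem.Dict.empty : PySem.Dict String Int)).items =
      sd.map (fun p => (p.1, (0 : Int))) := by
  have := PySem.Dict.items_foldl_insert_fresh sd (fun p => p.1) (fun _ => (0 : Int))
    (PySem.Dict.empty : PySem.Dict String Int) (fun a _ => PySem.Dict.contains_empty a.1) hk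
  simpa using this

-- list of nodup keys: count is an indicator
theorem pv_count_nodup (l : List String) (h : l.Nodup) (k : String) :
    l.count k = if k ∈ l then 1 else 0 := by
  by_cases hm : k ∈ l
  · rw [List.count_eq_one_of_mem h hm]; simp [hm]
  · rw [List.count_eq_zero_of_not_mem hm]; simp [hm]

-- sum of an indicator = countP
theorem pv_sum_ite (l : List String) (P : String → Bool) :
    ((l.map (fun w => if P w then (1 : Int) else 0)).sum) = ((l.countP P : Int)) := by
  induction l with
  | nil => simp
  | cons w l ih =>
    simp only [List.map_cons, List.sum_cons, ih, List.countP_cons]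
    by_cases h : P w = true <;> simp [h] <;> push_cast <;> ring

-- the B scoring loop: keys are preserved and each key counts its new words
theorem pv_loop (idx : PySem.Dict String (List String)) (toks : List String)
    (seen : PySem.Set String) (sc : PySem.Dict String Int)
    (hvals : ∀ w k, k ∈ idx.getD w [] → k ∈ sc.keys) :
    (toks.foldl (pvStepB idx) (seen, sc)).2.keys = sc.keys ∧
    ∀ k, (toks.foldl (pvStepB idx) (seen, sc)).2.getD k 0 =
      sc.getD k 0 + ((pvNewList seen toks).map (fun w => ((idx.getD w []).count k : Int))).sum := by
  induction toks generalizing seen sc with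
  | nil => simp [pvNewList]
  | cons t ts ih =>
    rw [List.foldl_cons]
    by_cases hcase : (PySem.Set.contains seen (PySem.Str.lower t) || !(pvHasAlpha (PySem.Str.lower t))) = true
    · have hstep : pvStepB idx (seen, sc) t = (seen, sc) := by
        simp only [pvStepB]; rw [if_pos hcase]
      rw [hstep]
      have hnl : pvNewList seen (t :: ts) = pvNewList seen ts := by
        simp only [pvNewList]; rw [if_pos hcase]
      rw [hnl]
      exact ih seen sc hvals
    · have hstep : pvStepB idx (seen, sc) t =
          (PySem.Set.add seen (PySem.Str.lower t),
           (idx.getD (PySem.Str.lower t) []).foldl (fun sc sense => sc.modify sense 0 (· + 1)) sc) := by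
        simp only [pvStepB]; rw [if_neg hcase]
      have hnl : pvNewList seen (t :: ts) = PySem.Str.lower t :: pvNewList (PySem.Set.add seen (PySem.Str.lower t)) ts := by
        simp only [pvNewList]; rw [if_neg hcase]
      set w := PySem.Str.lower t
      set sc' := (idx.getD w []).foldl (fun sc sense => sc.modify sense 0 (· + 1)) sc with hsc'
      have hkeys' : sc'.keys = sc.keys := by
        rw [hsc', PySem.Dict.keys_foldl_modify, PySem.Set.update_eq_append_filter]
        have : (PySem.Set.ofList (idx.getD w [])).filter (fun y => !(PySem.Set.contains sc.keys y)) = [] := by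
          apply List.filter_eq_nil_iff.mpr
          intro y hy
          have hy' : y ∈ idx.getD w [] := (PySem.Set.mem_ofList _ _).mp hy
          have := hvals w y hy'
          simp [PySem.Set.contains, pv_contains_eq, this]
        rw [this, List.append_nil]
      have hgetD' : ∀ k, sc'.getD k 0 = sc.getD k 0 + ((idx.getD w []).count k : Int) := by
        intro k
        rw [hsc', PySem.Dict.getD_foldl_modify_add_one]
      have hvals' : ∀ w' k, k ∈ idx.getD w' [] → k ∈ sc'.keys := by
        intro w' k hk; rw [hkeys']; exact hvals w' k hk
      obtain ⟨ihk, ihg⟩ := ih (PySem.Set.add seen w) sc' hvals'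
      rw [hstep]
      refine ⟨by rw [ihk, hkeys'], ?_⟩
      intro k
      rw [ihg k, hgetD' k, hnl]
      simp only [List.map_cons, List.sum_cons]
      ring

-- Set.contains, spelled as decidable membership
theorem pv_scontains (s : PySem.Set String) (y : String) :
    PySem.Set.contains s y = decide (y ∈ s) := by
  simp only [PySem.Set.contains_eq_listContains]
  exact pv_contains_eq s y

-- pvNewList from a seen-set s lists the fresh elements of the deduped filtered context
theorem pv_newList_eq (toks : List String) (s : PySem.Set String) :
    pvNewList s toks = (pvCtx toks).filter (fun w => !(PySem.Set.contains s w)) := by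
  induction toks generalizing s with
  | nil => simp [pvNewList, pvCtx]
  | cons t ts ih =>
    simp only [pvNewList, pvCtx, List.map_cons]
    by_cases ha : pvHasAlpha (PySem.Str.lower t) = true
    · rw [List.filter_cons_of_pos ha]
      have hofl : PySem.Set.ofList (PySem.Str.lower t :: ((ts.map PySem.Str.lower).filter pvHasAlpha)) =
          PySem.Str.lower t :: (PySem.Set.ofList ((ts.map PySem.Str.lower).filter pvHasAlpha)).filter
            (fun y => !(PySem.Set.contains [PySem.Str.lower t] y)) := by
        rw [show PySem.Set.ofList (PySem.Str.lower t :: ((ts.map PySem.Str.lower).filter pvHasAlpha)) =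
            PySem.Set.update (PySem.Set.add PySem.Set.empty (PySem.Str.lower t)) ((ts.map PySem.Str.lower).filter pvHasAlpha) from rfl]
        rw [PySem.Set.update_eq_append_filter]
        rfl
      rw [hofl]
      by_cases hc : PySem.Set.contains s (PySem.Str.lower t) = true
      · have hmem : PySem.Str.lower t ∈ s := by
          rw [pv_scontains] at hc
          exact of_decide_eq_true hc
        rw [if_pos (by rw [hc]; simp)]
        rw [ih s, List.filter_cons_of_neg (by rw [hc]; simp), List.filter_filter, pvCtx]
        refine (List.filter_congr ?_).symm
        intro y _
        simp only [pv_scontains]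
        by_cases hy : y = PySem.Str.lower t
        · subst hy
          simp [hmem]
        · simp [hy]
      · have hcf : PySem.Set.contains s (PySem.Str.lower t) = false := Bool.eq_false_iff.mpr hc
        rw [if_neg (by rw [hcf]; simp [ha])]
        rw [List.filter_cons_of_pos (by rw [hcf]; simp)]
        rw [ih (PySem.Set.add s (PySem.Str.lower t)), List.filter_filter, pvCtx]
        refine congrArg (List.cons (PySem.Str.lower t)) (List.filter_congr ?_).symm
        intro y _
        have hadd : PySem.Set.contains (PySem.Set.add s (PySem.Str.lower t)) y =
            decide (y ∈ s ∨ y = PySem.Str.lower t) := by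
          rw [pv_scontains]
          exact pv_decide_eq _ _ (PySem.Set.mem_add s (PySem.Str.lower t) y)
        rw [hadd]
        simp only [pv_scontains]
        by_cases hy : y = PySem.Str.lower t <;> by_cases hys : y ∈ s <;> simp [hy, hys]
    · rw [if_pos (by simp [ha]), List.filter_cons_of_neg (by simp [ha])]
      exact ih s

-- nodup-symmetric intersection count
theorem pv_inter_count (sig ctx : List String) (hs : sig.Nodup) (hc : ctx.Nodup) :
    (sig.filter (fun y => decide (y ∈ ctx))).length = ctx.countP (fun y => decide (y ∈ sig)) := by
  rw [List.countP_eq_length_filter]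
  have hperm : (sig.filter (fun y => decide (y ∈ ctx))).Perm (ctx.filter (fun y => decide (y ∈ sig))) := by
    apply List.perm_of_nodup_nodup_toFinset_eq (hs.filter _) (hc.filter _)
    apply Finset.ext
    intro a
    simp only [List.mem_toFinset, List.mem_filter, decide_eq_true_eq]
    exact ⟨fun ⟨h1, h2⟩ => ⟨h2, h1⟩, fun ⟨h1, h2⟩ => ⟨h2, h1⟩⟩
  exact hperm.length_eq

-- B's result, characterised the same way
theorem pv_lesk_B (senseDict : List (String × List String)) (sentence : String)
    (hpre : Pre_lesk senseDict sentence) :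
    lesk_alt senseDict sentence =
      PySem.List.sorted2
        (senseDict.map (fun p => (p.1,
          ((pvCtx (PySem.Str.split₀ sentence)).countP (fun w => decide (w ∈ p.2)) : Int))))
        (fun x => -x.2) (fun x => x.1) := by
  obtain ⟨hkeys, hsigs⟩ := hpre
  simp only [lesk_alt]
  congr 1
  set toks := PySem.Str.split₀ sentence
  set idx := senseDict.foldl (fun idx p =>
      p.2.foldl (fun idx w => idx.modify w [] (· ++ [p.1])) idx) (PySem.Dict.empty : PySem.Dict String (List String)) with hidx
  set sc0 := senseDict.foldl (fun d p => d.insert p.1 0) (PySem.Dict.empty : PySem.Dict String Int) with hsc0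
  have hitems0 : sc0.items = senseDict.map (fun p => (p.1, (0 : Int))) := pv_scores0_items senseDict hkeys
  have hkeys0 : sc0.keys = senseDict.map Prod.fst := by
    simp only [PySem.Dict.keys, hitems0, List.map_map]; rfl
  have hidxD : ∀ w, idx.getD w [] = (senseDict.filter (fun p => decide (w ∈ p.2))).map Prod.fst := by
    intro w
    rw [hidx, pv_idx_getD senseDict PySem.Dict.empty hsigs w]
    simp
  have hvals : ∀ w k, k ∈ idx.getD w [] → k ∈ sc0.keys := by
    intro w k hk
    rw [hidxD w] at hk
    rw [hkeys0]
    exact (List.filter_sublist.map Prod.fst).subset hk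
  obtain ⟨hK, hG⟩ := pv_loop idx toks PySem.Set.empty sc0 hvals
  have hnodupK : (toks.foldl (pvStepB idx) (PySem.Set.empty, sc0)).2.keys.Nodup := by
    rw [hK, hkeys0]; exact hkeys
  rw [PySem.Dict.items_eq_map_keys _ hnodupK 0, hK, hkeys0, List.map_map]
  apply List.map_congr_left
  intro p hp
  simp only [Function.comp_def]
  refine congrArg (Prod.mk p.1) ?_
  rw [hG p.1]
  have hg0 : sc0.getD p.1 0 = 0 := by
    refine PySem.Dict.getD_of_mem_items sc0 ?_ (by rw [hkeys0]; exact hkeys) 0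
    rw [hitems0]
    exact List.mem_map_of_mem hp
  have hnew : pvNewList PySem.Set.empty toks = pvCtx toks := by
    rw [pv_newList_eq]
    apply List.filter_eq_self.mpr
    intro y _
    simp [PySem.Set.contains, PySem.Set.empty]
  rw [hg0, hnew, zero_add]
  have hcnt : ∀ w, ((idx.getD w []).count p.1 : Int) = if decide (w ∈ p.2) then (1 : Int) else 0 := by
    intro w
    rw [hidxD w]
    have hnd : ((senseDict.filter (fun q => decide (w ∈ q.2))).map Prod.fst).Nodup :=
      (List.filter_sublist.map Prod.fst).nodup hkeys
    rw [pv_count_nodup _ hnd p.1]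
    by_cases hm : w ∈ p.2
    · have : p.1 ∈ (senseDict.filter (fun q => decide (w ∈ q.2))).map Prod.fst :=
        List.mem_map_of_mem (List.mem_filter.mpr ⟨hp, by simpa using hm⟩)
      simp [this, hm]
    · have : p.1 ∉ (senseDict.filter (fun q => decide (w ∈ q.2))).map Prod.fst := by
        intro hmem
        obtain ⟨q, hq, hq1⟩ := List.mem_map.mp hmem
        obtain ⟨hqsd, hqw⟩ := List.mem_filter.mp hq
        have : q = p := pv_key_unique senseDict hkeys p q hp hqsd hq1
        subst this
        exact hm (by simpa using hqw)
      simp [this, hm]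
  calc ((pvCtx toks).map (fun w => ((idx.getD w []).count p.1 : Int))).sum
      = ((pvCtx toks).map (fun w => if decide (w ∈ p.2) then (1 : Int) else 0)).sum := by
        exact congrArg List.sum (List.map_congr_left (fun w _ => hcnt w))
    _ = (((pvCtx toks).countP (fun w => decide (w ∈ p.2)) : Int)) := pv_sum_ite _ _

theorem lesk_eq (senseDict : List (String × List String)) (sentence : String)
    (hpre : Pre_lesk senseDict sentence) :
    lesk senseDict sentence = lesk_alt senseDict sentence := by
  rw [pv_lesk_A senseDict sentence hpre, pv_lesk_B senseDict sentence hpre]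
  congr 1
  apply List.map_congr_left
  intro p hp
  refine congrArg (Prod.mk p.1) ?_
  rw [pv_fctx_eq]
  have hctx : PySem.Set.ofList ((PySem.Str.split₀ sentence).map PySem.Str.lower |>.filter pvHasAlpha) =
      pvCtx (PySem.Str.split₀ sentence) := rfl
  rw [hctx]
  have hlen : PySem.Set.len (PySem.Set.inter p.2 (pvCtx (PySem.Str.split₀ sentence))) =
      ((p.2.filter (fun y => decide (y ∈ pvCtx (PySem.Str.split₀ sentence)))).length : Int) := by
    unfold PySem.Set.len PySem.Set.inter
    congr 2
    apply List.filter_congr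
    intro y _
    simp [PySem.Set.contains, pv_contains_eq]
  have hnodup : (pvCtx (PySem.Str.split₀ sentence)).Nodup := PySem.Set.nodup_ofList _
  rw [hlen, pv_inter_count p.2 _ (hpre.2 p hp) hnodup]

-- ===== VERDICT (by name: the statement is the Claim_ definition above) =====
theorem lesk_spec : Claim_equal_lesk := by
  intro senseDict sentence _ hpre
  exact lesk_eq senseDict sentence hpre
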